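-- pv_equiv track=rewrite | github.com/sunyinggang/modeling_and_traceability | server/modeling/app/utils/comon.py | parent_state_product
-- ===== SOURCE A (Python) =====
-- def parent_state_product(parent_states):
--     """
--     产生节点父节点状态的全集，即每个父节点状态的可能取值的笛卡儿积
--     :param parent_states:
--     :return:
--     """
--     parent_num = len(parent_states)
--     ret_state = [""]
--     for i in range(parent_num):
--         a = ret_state
--         b = range(1, parent_states[i] + 1)
--         ret_state = [f"{a[j]}{b[k]} " for j in range(len(a)) for k in range(len(b))]
--     return ret_state
-- ===== SOURCE B (Python) =====
-- def parent_state_product(parent_states):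
--     # Recursive right-decomposition: combine each value of the first range
--     # with every recursively built suffix string, instead of A's rolling
--     # left-to-right rebuild of the whole list.  Any nonpositive count makes
--     # the whole product empty, so bail out before enumerating anything.
--     if not parent_states:
--         return [""]
--     if any(m <= 0 for m in parent_states):
--         return []
--     n = parent_states[0]
--     tails = parent_state_product(parent_states[1:])
--     return [f"{v} {t}" for v in range(1, n + 1) for t in tails]
-- ===== Notes on version B (the rewrite author's own statement) =====
-- stated objective: alternative
-- what changed: A rebuilds the entire result list left-to-right, re-appending one 'digit ' to every accumulated string per parent; B recurses on the list from the head, combining each value of the first range with the recursively built suffix strings.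
import Mathlib
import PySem

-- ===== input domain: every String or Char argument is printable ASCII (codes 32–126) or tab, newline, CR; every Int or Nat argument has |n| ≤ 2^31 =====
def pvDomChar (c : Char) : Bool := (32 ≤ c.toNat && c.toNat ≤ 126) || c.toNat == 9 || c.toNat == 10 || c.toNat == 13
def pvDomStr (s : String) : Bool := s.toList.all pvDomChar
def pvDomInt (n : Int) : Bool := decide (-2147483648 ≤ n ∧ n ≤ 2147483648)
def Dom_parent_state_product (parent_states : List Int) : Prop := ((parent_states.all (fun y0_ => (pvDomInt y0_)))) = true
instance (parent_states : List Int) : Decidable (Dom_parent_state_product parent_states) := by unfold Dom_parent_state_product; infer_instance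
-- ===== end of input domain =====

-- B replaces A's rolling left-to-right rebuild of the whole string list with a
-- recursive right-decomposition (head range combined with recursively built suffixes); alternative, same cost.
-- ===== PORT A =====
-- A: ret_state = [""]; for each i, ret_state = [f"{a[j]}{b[k]} " for j ... for k ...]
def parent_state_product (parent_states : List Int) : List String :=
  let ret_state : List String := [""]
  parent_states.foldl (fun ret_state pi =>
    let a := ret_state
    -- b = range(1, pi+1) is a lazy range object in Python: len(b) = ((pi+1)-1).toNat and b[k] = 1+k, exact per range semantics
    let b_len : Nat := ((pi + 1) - 1).toNat
    (List.range a.length).flatMap (fun j =>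
      (List.range b_len).map (fun k =>
        a.getD j "" ++ PySem.Int.toStr (1 + (k : Int)) ++ " "))) ret_state

-- ===== PORT B =====
-- B: if empty return [""]; else combine each v of range(1, n+1) with every recursively built tail.
def parent_state_product_alt : List Int → List String
  | [] => [""]
  | n :: rest =>
    if (n :: rest).any (fun m => m ≤ 0) then []
    else
      let tails := parent_state_product_alt rest
      (PySem.List.pyRange 1 (n + 1) 1).flatMap (fun v =>
        tails.map (fun t => PySem.Int.toStr v ++ " " ++ t))

-- ===== PRECONDITION & SPEC =====
def Spec_parent_state_product (parent_states : List Int) (out : List String) : Prop := out = parent_state_product_alt parent_states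
instance (parent_states : List Int) (out : List String) : Decidable (Spec_parent_state_product parent_states out) := by unfold Spec_parent_state_product; infer_instance

-- ===== CLAIM (what is proved, stated in full; the proofs are below) =====
def Claim_equal_parent_state_product : Prop := ∀ (parent_states : List Int), Dom_parent_state_product parent_states → Spec_parent_state_product parent_states (parent_state_product parent_states)

-- ===== LEMMAS AND PROOFS =====

-- ===== VERDICT (by name: the statement is the Claim_ definition above) =====
-- index-comprehension = direct traversal
theorem range_flatMap_getD {α β : Type} (l : List α) (d : α) (f : α → List β) :
    (List.range l.length).flatMap (fun j => f (l.getD j d)) = l.flatMap f := by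
  induction l with
  | nil => rfl
  | cons x xs ih =>
    simp only [List.length_cons, List.range_succ_eq_map, List.flatMap_cons,
      List.flatMap_map, List.getD_cons_zero, List.getD_cons_succ]
    rw [show (List.range xs.length).flatMap (fun a => f (xs.getD a d)) = xs.flatMap f from ih]

-- one step of A's loop, in direct form
theorem stepA_eq (ret : List String) (pi : Int) :
    (let a := ret
     let b_len : Nat := ((pi + 1) - 1).toNat
     (List.range a.length).flatMap (fun j =>
       (List.range b_len).map (fun k =>
         a.getD j "" ++ PySem.Int.toStr (1 + (k : Int)) ++ " "))) =
    ret.flatMap (fun s => (PySem.List.pyRange 1 (pi + 1) 1).map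
      (fun v => s ++ PySem.Int.toStr v ++ " ")) := by
  simp only []
  rw [range_flatMap_getD (f := fun s => (List.range ((pi + 1) - 1).toNat).map
        (fun k => s ++ PySem.Int.toStr (1 + (k : Int)) ++ " "))]
  congr 1
  funext s
  rw [PySem.List.pyRange_one, List.map_map]
  simp [Function.comp_def, List.map_flatMap]
  rw [List.map_eq_flatMap]

theorem alt_nil_of_nonpos (ps : List Int) (h : ps.any (fun m => decide (m ≤ 0)) = true) :
    parent_state_product_alt ps = [] := by
  cases ps with
  | nil => simp at h
  | cons n rest =>
    simp only [parent_state_product_alt]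
    rw [if_pos h]

theorem alt_cons (n : Int) (rest : List Int) :
    parent_state_product_alt (n :: rest) =
    (PySem.List.pyRange 1 (n + 1) 1).flatMap (fun v =>
      (parent_state_product_alt rest).map (fun t => PySem.Int.toStr v ++ " " ++ t)) := by
  simp only [parent_state_product_alt]
  split_ifs with h
  · simp only [List.any_cons, Bool.or_eq_true, decide_eq_true_eq] at h
    rcases h with hn | hrest
    · have h1 : ((n + 1 : Int) - 1).toNat = 0 := by omega
      rw [PySem.List.pyRange_one, h1]
      simp
    · rw [alt_nil_of_nonpos rest (by simpa using hrest)]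
      simp
  · rfl

theorem fold_eq_alt (ps : List Int) (acc : List String) :
    ps.foldl (fun ret pi =>
      ret.flatMap (fun s => (PySem.List.pyRange 1 (pi + 1) 1).map
        (fun v => s ++ PySem.Int.toStr v ++ " "))) acc =
    acc.flatMap (fun s => (parent_state_product_alt ps).map (fun t => s ++ t)) := by
  induction ps generalizing acc with
  | nil =>
    simp [parent_state_product_alt]
  | cons n rest ih =>
    rw [List.foldl_cons, ih, alt_cons]
    simp [List.flatMap_assoc, List.flatMap_map, List.map_flatMap, List.map_map,
      Function.comp_def, String.append_assoc]

theorem parent_state_product_spec : Claim_equal_parent_state_product := by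
  intro ps _
  unfold Spec_parent_state_product parent_state_product
  simp only [stepA_eq]
  rw [fold_eq_alt]
  simp
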